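-- pv_equiv track=rewrite | github.com/limachara/EGE_2024 | task5CC2816/5CCr-6.py | f
-- ===== SOURCE A (Python) =====
-- def st23(a):
--     s1 = 0
--     s2 = 0
--     for el in a:
--         if el % 2 == 0:
--             s2 += el
--         else:
--             s1 += el
--     if s1 > s2:
--         return s1 % 80
--     return s2 % 80
--
-- def f(n):
--     a = []
--     while n > 0:
--         a.append(n % 80)
--         n //= 80
--     a = a[::-1]
--     a.append(st23(a))
--     a.append(st23(a))
--     a = a[::-1]
--     r = 0
--     for i in range(len(a)):
--         r += a[i] * 80 ** i
--     return r
-- ===== SOURCE B (Python) =====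
-- def f(n):
--     # recursive MSB-first digit-sum, then a uniform two-round check-digit
--     # appender using Horner's rule (no list, no reversals, no power sums)
--     def sums(m):
--         if m <= 0:
--             return (0, 0)
--         q, d = divmod(m, 80)
--         s1, s2 = sums(q)
--         return (s1 + d, s2) if d % 2 else (s1, s2 + d)
--
--     s1, s2 = sums(n)
--     r = n if n > 0 else 0
--     for _ in range(2):
--         c = (s1 if s1 > s2 else s2) % 80
--         if c % 2:
--             s1 += c
--         else:
--             s2 += c
--         r = r * 80 + c
--     return r
-- ===== Notes on version B (the rewrite author's own statement) =====
-- stated objective: alternative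
-- what changed: B replaces A's iterative digit-list build, double reversal and power-sum reconstruction with an MSB-first recursion computing the odd/even digit sums as two scalars, then a uniform two-round loop that generates both check digits and appends them by Horner's rule; no list is ever materialised.
import Mathlib
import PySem

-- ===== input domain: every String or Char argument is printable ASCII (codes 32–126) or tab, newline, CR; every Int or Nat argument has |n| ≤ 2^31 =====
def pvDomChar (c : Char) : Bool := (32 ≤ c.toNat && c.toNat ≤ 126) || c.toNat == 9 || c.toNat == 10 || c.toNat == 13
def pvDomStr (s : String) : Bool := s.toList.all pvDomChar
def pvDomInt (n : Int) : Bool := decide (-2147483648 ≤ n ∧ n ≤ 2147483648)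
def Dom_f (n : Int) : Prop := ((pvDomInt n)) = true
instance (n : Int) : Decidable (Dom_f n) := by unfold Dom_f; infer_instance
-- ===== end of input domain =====

-- B replaces A's digit-list build, double reversal and power-sum reconstruction by an
-- MSB-first recursion over the base-80 digits plus a uniform two-round Horner appender
-- of the check digits (alternative decomposition, no list is built).

-- ===== PORT A =====
-- Python st23: fold over the list keeping (s1, s2), then branch.
def st23 (a : List Int) : Int :=
  let p := a.foldl (fun (p : Int × Int) el =>
    if PySem.Int.mod el 2 = 0 then (p.1, p.2 + el) else (p.1 + el, p.2)) (0, 0)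
  if p.1 > p.2 then PySem.Int.mod p.1 80 else PySem.Int.mod p.2 80

-- the while loop 'while n > 0: a.append(n % 80); n //= 80' (a grows at the end, LSB first)
def fDigits (n : Int) : List Int :=
  if _h : n > 0 then PySem.Int.mod n 80 :: fDigits (PySem.Int.floordiv n 80) else []
termination_by n.toNat
decreasing_by
  rw [PySem.Int.floordiv_eq_ediv_of_pos (by norm_num : (0:Int) < 80)]
  omega

def f (n : Int) : Int :=
  let a := fDigits n
  let a := a.reverse
  let a := a ++ [st23 a]
  let a := a ++ [st23 a]
  let a := a.reverse
  (PySem.List.pyRange 0 (a.length : Int) 1).foldl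
    (fun r i => r + PySem.List.pyGetD a i 0 * 80 ^ i.toNat) 0

-- ===== PORT B =====
-- Source B's inner recursion 'sums': MSB-first odd/even digit sums of m
-- (divmod(m, 80) is ported as (floordiv m 80, mod m 80); exact since 80 ≠ 0)
def sumsRec (m : Int) : Int × Int :=
  if _h : m ≤ 0 then (0, 0)
  else
    let q := PySem.Int.floordiv m 80
    let d := PySem.Int.mod m 80
    let p := sumsRec q
    if PySem.Int.mod d 2 ≠ 0 then (p.1 + d, p.2) else (p.1, p.2 + d)
termination_by m.toNat
decreasing_by
  rw [PySem.Int.floordiv_eq_ediv_of_pos (by norm_num : (0:Int) < 80)]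
  omega

-- the 'for _ in range(2)' loop of Source B over the state (s1, s2, r)
def f_alt (n : Int) : Int :=
  let p := sumsRec n
  let st := (List.range 2).foldl
    (fun (st : Int × Int × Int) _ =>
      let c := PySem.Int.mod (if st.1 > st.2.1 then st.1 else st.2.1) 80
      if PySem.Int.mod c 2 ≠ 0 then (st.1 + c, st.2.1, st.2.2 * 80 + c)
      else (st.1, st.2.1 + c, st.2.2 * 80 + c))
    (p.1, p.2, if n > 0 then n else 0)
  st.2.2

-- ===== PRECONDITION & SPEC =====
def Spec_f (n : Int) (out : Int) : Prop := out = f_alt n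
instance (n : Int) (out : Int) : Decidable (Spec_f n out) := by unfold Spec_f; infer_instance

-- ===== CLAIM (what is proved, stated in full; the proofs are below) =====
def Claim_equal_f : Prop := ∀ (n : Int), Dom_f n → Spec_f n (f n)

-- ===== LEMMAS AND PROOFS =====

-- sums of the odd and even elements of a list
def sumOdd (l : List Int) : Int :=
  (l.map (fun el => if PySem.Int.mod el 2 = 0 then 0 else el)).sum
def sumEven (l : List Int) : Int :=
  (l.map (fun el => if PySem.Int.mod el 2 = 0 then el else 0)).sum

lemma sumOdd_nil : sumOdd [] = 0 := rfl
lemma sumEven_nil : sumEven [] = 0 := rfl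
lemma sumOdd_cons (d : Int) (t : List Int) :
    sumOdd (d :: t) = (if PySem.Int.mod d 2 = 0 then 0 else d) + sumOdd t := rfl
lemma sumEven_cons (d : Int) (t : List Int) :
    sumEven (d :: t) = (if PySem.Int.mod d 2 = 0 then d else 0) + sumEven t := rfl

lemma sumOdd_reverse (l : List Int) : sumOdd l.reverse = sumOdd l := by
  unfold sumOdd; rw [List.map_reverse, List.sum_reverse]
lemma sumEven_reverse (l : List Int) : sumEven l.reverse = sumEven l := by
  unfold sumEven; rw [List.map_reverse, List.sum_reverse]
lemma sumOdd_append (l m : List Int) : sumOdd (l ++ m) = sumOdd l + sumOdd m := by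
  unfold sumOdd; rw [List.map_append, List.sum_append]
lemma sumEven_append (l m : List Int) : sumEven (l ++ m) = sumEven l + sumEven m := by
  unfold sumEven; rw [List.map_append, List.sum_append]
lemma sumOdd_singleton (c : Int) :
    sumOdd [c] = (if PySem.Int.mod c 2 = 0 then 0 else c) := by
  rw [sumOdd_cons, sumOdd_nil, add_zero]
lemma sumEven_singleton (c : Int) :
    sumEven [c] = (if PySem.Int.mod c 2 = 0 then c else 0) := by
  rw [sumEven_cons, sumEven_nil, add_zero]

lemma st23_foldl (l : List Int) (s1 s2 : Int) :
    l.foldl (fun (p : Int × Int) el =>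
      if PySem.Int.mod el 2 = 0 then (p.1, p.2 + el) else (p.1 + el, p.2)) (s1, s2)
    = (s1 + sumOdd l, s2 + sumEven l) := by
  induction l generalizing s1 s2 with
  | nil => rw [List.foldl_nil, sumOdd_nil, sumEven_nil, add_zero, add_zero]
  | cons d t ih =>
    rw [List.foldl_cons, sumOdd_cons, sumEven_cons]
    by_cases h : PySem.Int.mod d 2 = 0
    · rw [if_pos h, if_pos h, if_pos h]
      show List.foldl _ (s1, s2 + d) t = _
      rw [ih, Prod.mk.injEq]
      constructor <;> ring
    · rw [if_neg h, if_neg h, if_neg h]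
      show List.foldl _ (s1 + d, s2) t = _
      rw [ih, Prod.mk.injEq]
      constructor <;> ring

lemma st23_eq (l : List Int) :
    st23 l = (if sumOdd l > sumEven l then PySem.Int.mod (sumOdd l) 80
              else PySem.Int.mod (sumEven l) 80) := by
  unfold st23
  simp only [st23_foldl, zero_add]

lemma fDigits_pos (n : Int) (h : n > 0) :
    fDigits n = PySem.Int.mod n 80 :: fDigits (PySem.Int.floordiv n 80) := by
  rw [fDigits]; rw [dif_pos h]

lemma sumsRec_eq_aux (k : Nat) : ∀ (m : Int), m.toNat ≤ k →
    sumsRec m = (sumOdd (fDigits m), sumEven (fDigits m)) := by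
  induction k with
  | zero =>
    intro m hm
    have h0 : m ≤ 0 := by omega
    rw [sumsRec, dif_pos h0, fDigits, dif_neg (by omega : ¬ m > 0), sumOdd_nil, sumEven_nil]
  | succ k ih =>
    intro m hm
    by_cases h0 : m ≤ 0
    · rw [sumsRec, dif_pos h0, fDigits, dif_neg (by omega : ¬ m > 0), sumOdd_nil, sumEven_nil]
    · have hq : (PySem.Int.floordiv m 80).toNat ≤ k := by
        rw [PySem.Int.floordiv_eq_ediv_of_pos (by norm_num : (0:Int) < 80)]
        omega
      rw [sumsRec, dif_neg h0]
      simp only []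
      rw [ih _ hq, fDigits_pos m (by omega), sumOdd_cons, sumEven_cons]
      by_cases hp : PySem.Int.mod (PySem.Int.mod m 80) 2 = 0
      · rw [if_neg (not_not_intro hp), if_pos hp, if_pos hp, Prod.mk.injEq]
        constructor <;> ring
      · rw [if_pos hp, if_neg hp, if_neg hp, Prod.mk.injEq]
        constructor <;> ring

lemma sumsRec_eq (m : Int) :
    sumsRec m = (sumOdd (fDigits m), sumEven (fDigits m)) :=
  sumsRec_eq_aux m.toNat m le_rfl

-- base-80 value of an LSB-first digit list
def val80 (l : List Int) : Int := l.foldr (fun d acc => d + 80 * acc) 0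

lemma val80_fDigits (n : Int) : val80 (fDigits n) = if n > 0 then n else 0 := by
  fun_induction fDigits n with
  | case1 n h ih =>
    have hfm := PySem.Int.floordiv_mul_add_mod n 80
    have h80 : PySem.Int.floordiv n 80 = n / 80 :=
      PySem.Int.floordiv_eq_ediv_of_pos (by norm_num)
    simp only [val80, List.foldr_cons] at *
    rw [ih, if_pos h]
    rw [h80] at hfm ⊢
    split_ifs <;> omega
  | case2 n h => rw [if_neg h]; rfl

-- generalized evaluation of the reconstruction fold
def polyval (l : List Int) (g : Nat → Int) : Int :=
  match l with
  | [] => 0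
  | d :: t => d * g 0 + polyval t (fun k => g (k + 1))

lemma polyval_mul (l : List Int) (c : Int) (g : Nat → Int) :
    polyval l (fun k => c * g k) = c * polyval l g := by
  induction l generalizing g with
  | nil => simp [polyval]
  | cons d t ih => simp only [polyval, ih]; ring

lemma foldl_range_getD (l : List Int) (g : Nat → Int) (r0 : Int) :
    (List.range l.length).foldl (fun r k => r + l.getD k 0 * g k) r0
      = r0 + polyval l g := by
  induction l generalizing g r0 with
  | nil => simp [polyval]
  | cons d t ih =>
    rw [List.length_cons, List.range_succ_eq_map, List.foldl_cons, List.foldl_map]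
    simp only [List.getD_cons_zero, List.getD_cons_succ]
    rw [ih (fun k => g (k + 1)) (r0 + d * g 0)]
    simp only [polyval]; ring

lemma polyval_pow (l : List Int) : polyval l (fun k => (80:Int) ^ k) = val80 l := by
  induction l with
  | nil => rfl
  | cons d t ih =>
    simp only [polyval, val80, List.foldr_cons]
    have hg : (fun k => (80:Int) ^ (k + 1)) = (fun k => 80 * 80 ^ k) := by
      funext k; ring
    rw [hg, polyval_mul, ih]
    simp only [val80, pow_zero]; ring

lemma recon_eq (l : List Int) :
    (PySem.List.pyRange 0 (l.length : Int) 1).foldl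
      (fun r i => r + PySem.List.pyGetD l i 0 * 80 ^ i.toNat) 0 = val80 l := by
  rw [PySem.List.pyRange_zero_nat, List.foldl_map]
  have hstep : ∀ (r : Int) (k : Nat),
      r + PySem.List.pyGetD l (k : Int) 0 * 80 ^ ((k : Int)).toNat
        = r + l.getD k 0 * 80 ^ k := by
    intro r k
    rw [PySem.List.pyGetD_natCast, Int.toNat_natCast]
  simp only [hstep]
  rw [foldl_range_getD l (fun k => (80:Int) ^ k) 0, polyval_pow, zero_add]

-- ===== VERDICT (by name: the statement is the Claim_ definition above) =====
theorem f_spec : Claim_equal_f := by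
  intro n _
  unfold Spec_f f f_alt
  simp only []
  rw [sumsRec_eq]
  set d := fDigits n with hd
  set s1 := sumOdd d with hs1
  set s2 := sumEven d with hs2
  have hrev : ∀ (c1 c2 : Int), ((d.reverse ++ [c1]) ++ [c2]).reverse = c2 :: c1 :: d := by
    intro c1 c2; simp
  have hc1 : st23 d.reverse
      = (if s1 > s2 then PySem.Int.mod s1 80 else PySem.Int.mod s2 80) := by
    rw [st23_eq, sumOdd_reverse, sumEven_reverse]
  rw [hc1]
  set c1 := if s1 > s2 then PySem.Int.mod s1 80 else PySem.Int.mod s2 80 with hc1def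
  set q := if PySem.Int.mod c1 2 = 0 then (s1, s2 + c1) else (s1 + c1, s2) with hq
  have hc2 : st23 (d.reverse ++ [c1])
      = (if q.1 > q.2 then PySem.Int.mod q.1 80 else PySem.Int.mod q.2 80) := by
    rw [st23_eq, sumOdd_append, sumEven_append, sumOdd_reverse, sumEven_reverse,
      sumOdd_singleton, sumEven_singleton, hq]
    by_cases h : PySem.Int.mod c1 2 = 0
    · rw [if_pos h, if_pos h, if_pos h, add_zero]
    · rw [if_neg h, if_neg h, if_neg h, add_zero]
  rw [hc2, hrev, recon_eq]
  set c2 := if q.1 > q.2 then PySem.Int.mod q.1 80 else PySem.Int.mod q.2 80 with hc2def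
  -- left side is the base-80 value of (c2 :: c1 :: d)
  have hL : val80 (c2 :: c1 :: d)
      = ((if n > 0 then n else 0) * 80 + c1) * 80 + c2 := by
    simp only [val80, List.foldr_cons]
    rw [show (List.foldr (fun d acc => d + 80 * acc) 0 d : Int) = val80 d from rfl,
      hd, val80_fDigits]
    ring
  rw [hL]
  -- right side: unroll the two iterations of Source B's loop
  have hr2 : List.range 2 = [0, 1] := rfl
  rw [hr2]
  simp only [List.foldl_cons, List.foldl_nil]
  have hBc1 : PySem.Int.mod (if s1 > s2 then s1 else s2) 80 = c1 := by
    rw [hc1def, apply_ite (fun x => PySem.Int.mod x 80)]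
  rw [hBc1]
  by_cases hp : PySem.Int.mod c1 2 = 0
  · rw [if_neg (not_not_intro hp)]
    simp only [hq, if_pos hp] at hc2def
    simp only []
    rw [hc2def, apply_ite (fun x => PySem.Int.mod x 80)]
    split_ifs <;> rfl
  · rw [if_pos hp]
    simp only [hq, if_neg hp] at hc2def
    simp only []
    rw [hc2def, apply_ite (fun x => PySem.Int.mod x 80)]
    split_ifs <;> rfl
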